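-- pv_equiv track=rewrite | github.com/hyunchan-jung/Study_Algorithm | Programmers/pccp_exam_1_1.py | solution
-- ===== SOURCE A (Python) =====
-- def solution(input_string):
--     answer = ''
--
--     for alp in sorted(set([alp for alp in input_string if input_string.count(alp) >= 2])):
--         n = input_string.count(alp)
--         if alp * n in input_string:
--             continue
--         for i in range(2, n + 1):
--             if n % i == 0 and input_string.count(alp * (n//i)) == i:
--                 answer += alp
--                 break
--
--     return answer if answer else 'N'
-- ===== SOURCE B (Python) =====
-- def solution(input_string):
--     # Run-length encode once, then answer per character from run-length arithmetic
--     # (no repeated substring scans of the input).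
--     runs = []
--     prev = None
--     cnt = 0
--     for ch in input_string:
--         if ch == prev:
--             cnt += 1
--         else:
--             if prev is not None:
--                 runs.append((prev, cnt))
--             prev = ch
--             cnt = 1
--     if prev is not None:
--         runs.append((prev, cnt))
--     answer = []
--     for c in sorted(set(ch for ch, _ in runs)):
--         lengths = [l for ch, l in runs if ch == c]
--         n = sum(lengths)
--         if n < 2 or len(lengths) == 1:
--             continue
--         for k in range(2, n + 1):
--             if n % k == 0 and sum(l // (n // k) for l in lengths) == k:
--                 answer.append(c)
--                 break
--     return ''.join(answer) if answer else 'N'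
-- ===== Notes on version B (the rewrite author's own statement) =====
-- stated objective: faster
-- what changed: B makes one run-length-encoding pass over the string and answers every per-character test from run-length arithmetic (total count = sum of run lengths, non-overlapping count of alp*m = sum of length//m over runs, the 'alp*n in s' guard = the character occupies a single run), where A rescans the whole string with count()/'in' for every candidate character and every divisor.
import Mathlib
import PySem

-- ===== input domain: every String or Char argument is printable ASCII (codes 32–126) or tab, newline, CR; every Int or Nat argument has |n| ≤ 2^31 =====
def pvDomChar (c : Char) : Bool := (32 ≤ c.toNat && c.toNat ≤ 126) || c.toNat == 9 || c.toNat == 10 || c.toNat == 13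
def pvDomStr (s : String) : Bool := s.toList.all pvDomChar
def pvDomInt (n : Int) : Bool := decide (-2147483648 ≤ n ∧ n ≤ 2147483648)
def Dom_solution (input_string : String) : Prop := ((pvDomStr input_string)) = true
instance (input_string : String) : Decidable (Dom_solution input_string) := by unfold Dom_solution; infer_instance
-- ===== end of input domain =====

-- B replaces A's repeated substring scans (count / 'in' per character per divisor) by one
-- run-length encoding pass and run-length arithmetic; objective: faster.

-- ===== PORT A =====
def solution (input_string : String) : String :=
  let s := input_string.toList
  let cands := PySem.List.sorted
    (PySem.Set.ofList (s.filter (fun alp => decide (2 ≤ PySem.Chars.count s [alp])))) (fun x => x) false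
  let answer := cands.foldl (fun (answer : List Char) alp =>
    let n : Nat := PySem.Chars.count s [alp]
    if PySem.Chars.isIn (List.replicate n alp) s then answer
    else
      match (PySem.List.pyRange 2 ((n : Int) + 1) 1).find? (fun i =>
          PySem.Int.mod (n : Int) i == 0 &&
          ((PySem.Chars.count s (List.replicate (PySem.Int.floordiv (n : Int) i).toNat alp) : Int) == i)) with
      | some _ => answer ++ [alp]
      | none => answer) []
  if answer.isEmpty then "N" else String.ofList answer

-- ===== PORT B =====
-- one step of B's run-length-encoding loop: state = (finished runs, current char, current run length)
def stepRunsB (st : List (Char × Nat) × Option Char × Nat) (ch : Char) : List (Char × Nat) × Option Char × Nat :=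
  if some ch = st.2.1 then (st.1, st.2.1, st.2.2 + 1)
  else
    match st.2.1 with
    | none => (st.1, some ch, 1)
    | some p => (st.1 ++ [(p, st.2.2)], some ch, 1)

-- B's trailing 'if prev is not None: runs.append((prev, cnt))'
def flushRunsB (st : List (Char × Nat) × Option Char × Nat) : List (Char × Nat) :=
  match st.2.1 with
  | none => st.1
  | some p => st.1 ++ [(p, st.2.2)]

def runsB (s : List Char) : List (Char × Nat) :=
  flushRunsB (s.foldl stepRunsB ([], none, 0))

def solution_alt (input_string : String) : String :=
  let runs := runsB input_string.toList
  let answer := (PySem.List.sorted (PySem.Set.ofList (runs.map (·.1))) (fun x => x) false).foldl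
    (fun (answer : List Char) c =>
      let lengths : List Nat := (runs.filter (fun p => p.1 == c)).map (·.2)
      let n : Nat := lengths.sum
      if n < 2 || lengths.length == 1 then answer
      else
        match (PySem.List.pyRange 2 ((n : Int) + 1) 1).find? (fun k =>
            PySem.Int.mod (n : Int) k == 0 &&
            ((lengths.map (fun l : Nat => PySem.Int.floordiv (l : Int) (PySem.Int.floordiv (n : Int) k))).sum == k)) with
        | some _ => answer ++ [c]
        | none => answer) []
  if answer.isEmpty then "N" else String.ofList answer

-- ===== PRECONDITION & SPEC =====
def Spec_solution (input_string : String) (out : String) : Prop := out = solution_alt input_string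
instance (input_string : String) (out : String) : Decidable (Spec_solution input_string out) := by
  unfold Spec_solution; infer_instance

-- ===== CLAIM (what is proved, stated in full; the proofs are below) =====
def Claim_equal_solution : Prop := ∀ (input_string : String), Dom_solution input_string → Spec_solution input_string (solution input_string)

-- ===== LEMMAS AND PROOFS =====

-- structural model of Python's non-overlapping str.count with a NONEMPTY pattern p :: ps
def pvCnt (p : Char) (ps : List Char) : List Char → Nat
  | [] => 0
  | h :: t =>
      if (p :: ps).isPrefixOf (h :: t) then pvCnt p ps ((h :: t).drop (ps.length + 1)) + 1
      else pvCnt p ps t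
termination_by l => l.length
decreasing_by
  · simp only [List.length_drop, List.length_cons]; omega
  · simp only [List.length_cons]; omega

-- run-length encoding of a list, by maximal-run recursion (proof-side mirror of runsB)
def pvRuns : List Char → List (Char × Nat)
  | [] => []
  | c :: t => (c, (t.takeWhile (· == c)).length + 1) :: pvRuns (t.dropWhile (· == c))
termination_by l => l.length
decreasing_by simpa using Nat.lt_succ_of_le (List.length_dropWhile_le (· == c) t)

-- strong induction on list length
lemma list_length_induction {α : Type} (P : List α → Prop)
    (h : ∀ s, (∀ t : List α, t.length < s.length → P t) → P s) : ∀ s, P s := by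
  have H : ∀ n (s : List α), s.length ≤ n → P s := by
    intro n
    induction n with
    | zero => intro s hs; exact h s (fun t ht => False.elim (by omega))
    | succ n ihn => intro s hs; exact h s (fun t ht => ihn t (by omega))
  exact fun s => H s.length s le_rfl

lemma pvGo_eq (p : Char) (ps : List Char) :
    ∀ (fuel : Nat) (s : List Char) (acc : Nat), s.length ≤ fuel →
      PySem.Chars.count.go (p :: ps) fuel s acc = acc + pvCnt p ps s := by
  intro fuel
  induction fuel with
  | zero =>
      intro s acc h
      have : s = [] := List.eq_nil_of_length_eq_zero (Nat.le_zero.mp h)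
      subst this
      rw [PySem.Chars.count.go.eq_def]; simp [pvCnt]
  | succ f ih =>
      intro s acc h
      cases s with
      | nil => rw [PySem.Chars.count.go.eq_def]; simp [pvCnt]
      | cons a t =>
          rw [PySem.Chars.count.go.eq_def]
          simp only [List.length_cons] at h
          by_cases hp : (p :: ps).isPrefixOf (a :: t) = true
          · simp only [hp, if_true]
            have hlen : (List.drop (p :: ps).length (a :: t)).length ≤ f := by
              rw [List.length_drop]; simp only [List.length_cons]; omega
            rw [ih _ _ hlen]
            have hcnt : pvCnt p ps (a :: t) = pvCnt p ps ((a :: t).drop (ps.length + 1)) + 1 := by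
              rw [pvCnt]; simp [hp]
            rw [hcnt]
            simp only [List.length_cons]
            omega
          · simp only [hp, Bool.false_eq_true, if_false]
            rw [ih _ _ (by omega : t.length ≤ f)]
            have hcnt : pvCnt p ps (a :: t) = pvCnt p ps t := by
              rw [pvCnt]; simp [hp]
            rw [hcnt]

lemma count_eq_pvCnt (s : List Char) (p : Char) (ps : List Char) :
    PySem.Chars.count s (p :: ps) = pvCnt p ps s := by
  simp only [PySem.Chars.count, List.isEmpty_cons]
  simpa using pvGo_eq p ps s.length s 0 le_rfl

lemma count_nil_pat (p : Char) (ps : List Char) : PySem.Chars.count [] (p :: ps) = 0 := by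
  rw [count_eq_pvCnt]; simp [pvCnt]

lemma count_cons_prefix {p a : Char} {ps t : List Char}
    (h : (p :: ps).isPrefixOf (a :: t) = true) :
    PySem.Chars.count (a :: t) (p :: ps) = PySem.Chars.count ((a :: t).drop (ps.length + 1)) (p :: ps) + 1 := by
  rw [count_eq_pvCnt, count_eq_pvCnt]
  conv_lhs => rw [pvCnt]
  simp [h]

lemma count_cons_not_prefix {p a : Char} {ps t : List Char}
    (h : ¬ (p :: ps).isPrefixOf (a :: t) = true) :
    PySem.Chars.count (a :: t) (p :: ps) = PySem.Chars.count t (p :: ps) := by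
  rw [count_eq_pvCnt, count_eq_pvCnt]
  conv_lhs => rw [pvCnt]
  simp [h]

lemma head_dropWhile_false {α : Type} (p : α → Bool) (l : List α) (a : α)
    (h : (l.dropWhile p).head? = some a) : p a = false := by
  induction l with
  | nil => simp at h
  | cons x t ih =>
      by_cases hx : p x = true
      · rw [List.dropWhile_cons_of_pos hx] at h; exact ih h
      · rw [List.dropWhile_cons_of_neg hx] at h
        simp at h; subst h; simpa using hx

lemma repl_prefix_iff (c : Char) (r : List Char) (hr : ∀ a, r.head? = some a → a ≠ c) :
    ∀ (m j : Nat), (List.replicate m c <+: List.replicate j c ++ r) ↔ m ≤ j := by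
  intro m
  induction m with
  | zero => intro j; simp
  | succ mm ih =>
      intro j
      cases j with
      | zero =>
          simp only [List.replicate_zero, List.nil_append]
          constructor
          · intro h
            exfalso
            cases r with
            | nil =>
                rw [List.prefix_nil] at h
                simpa using congrArg List.length h
            | cons b rt =>
                rw [List.replicate_succ, List.cons_prefix_cons] at h
                exact hr b rfl h.1.symm
          · omega
      | succ j =>
          rw [List.replicate_succ, List.replicate_succ (n := j), List.cons_append, List.cons_prefix_cons]
          simp [ih j]

lemma count_repl_other {c d : Char} (hdc : d ≠ c) (mm : Nat) :
    ∀ (j : Nat) (r : List Char),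
      PySem.Chars.count (List.replicate j d ++ r) (List.replicate (mm + 1) c)
        = PySem.Chars.count r (List.replicate (mm + 1) c) := by
  intro j
  induction j with
  | zero => simp
  | succ k ih =>
      intro r
      rw [List.replicate_succ, List.cons_append, List.replicate_succ]
      rw [count_cons_not_prefix, ← List.replicate_succ, ih]
      intro h
      have := (List.cons_prefix_cons.mp (List.isPrefixOf_iff_prefix.mp h)).1
      exact hdc this.symm

lemma count_repl_run (c : Char) (mm : Nat) (r : List Char)
    (hr : ∀ a, r.head? = some a → a ≠ c) :
    ∀ (j : Nat),
      PySem.Chars.count (List.replicate j c ++ r) (List.replicate (mm + 1) c)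
        = j / (mm + 1) + PySem.Chars.count r (List.replicate (mm + 1) c) := by
  intro j
  induction j using Nat.strong_induction_on with
  | _ j ih =>
      by_cases hj : mm + 1 ≤ j
      · obtain ⟨t, ht⟩ : ∃ t, List.replicate j c ++ r = c :: t := by
          cases j with
          | zero => omega
          | succ k => exact ⟨List.replicate k c ++ r, by rw [List.replicate_succ, List.cons_append]⟩
        have hpre : (c :: List.replicate mm c).isPrefixOf (c :: t) = true := by
          rw [← List.replicate_succ, List.isPrefixOf_iff_prefix, ← ht]
          exact (repl_prefix_iff c r hr (mm + 1) j).mpr hj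
        rw [ht]
        rw [show List.replicate (mm + 1) c = c :: List.replicate mm c from List.replicate_succ ..]
        rw [count_cons_prefix hpre]
        simp only [List.length_replicate]
        have hdrop : List.drop (mm + 1) (c :: t) = List.replicate (j - (mm + 1)) c ++ r := by
          rw [← ht, List.drop_append, List.drop_replicate]
          have : mm + 1 - (List.replicate j c).length = 0 := by
            simp only [List.length_replicate]; omega
          rw [this, List.drop_zero]
        rw [hdrop, ← List.replicate_succ, ih _ (by omega)]
        rw [Nat.div_eq_sub_div (by omega) hj]
        omega
      · cases j with
        | zero => simp
        | succ k =>
            have hnp : ¬ (c :: List.replicate mm c).isPrefixOf (c :: (List.replicate k c ++ r)) = true := by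
              intro h
              have h2 := (List.cons_prefix_cons.mp (List.isPrefixOf_iff_prefix.mp h)).2
              have := (repl_prefix_iff c r hr mm k).mp h2
              omega
            rw [List.replicate_succ, List.cons_append]
            rw [show List.replicate (mm + 1) c = c :: List.replicate mm c from List.replicate_succ ..]
            rw [count_cons_not_prefix hnp, ← List.replicate_succ, ih k (by omega)]
            have h1 : k / (mm + 1) = 0 := Nat.div_eq_of_lt (by omega)
            have h2 : (k + 1) / (mm + 1) = 0 := Nat.div_eq_of_lt (by omega)
            omega

-- decomposition of a nonempty list into its first maximal run
lemma run_decomp (c : Char) (t : List Char) :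
    c :: t = List.replicate ((t.takeWhile (· == c)).length + 1) c ++ t.dropWhile (· == c) := by
  have h1 : t.takeWhile (· == c) = List.replicate (t.takeWhile (· == c)).length c := by
    rw [List.eq_replicate_iff]
    exact ⟨rfl, fun b hb => by simpa using List.mem_takeWhile_imp hb⟩
  conv_lhs => rw [← List.takeWhile_append_dropWhile (p := (· == c)) (l := t)]
  rw [List.replicate_succ, List.cons_append]
  congr 1
  rw [← h1]

lemma pvRuns_cons (c : Char) (t : List Char) :
    pvRuns (c :: t) = (c, (t.takeWhile (· == c)).length + 1) :: pvRuns (t.dropWhile (· == c)) := by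
  rw [pvRuns]

-- the run view of a nonempty list: first maximal run with opaque length/remainder
lemma run_view (c' : Char) (t : List Char) :
    ∃ (k : Nat) (r : List Char),
      c' :: t = List.replicate (k + 1) c' ++ r ∧
      (∀ a, r.head? = some a → a ≠ c') ∧
      r.length < (c' :: t).length ∧
      pvRuns (c' :: t) = (c', k + 1) :: pvRuns r := by
  refine ⟨(t.takeWhile (· == c')).length, t.dropWhile (· == c'), run_decomp c' t, ?_, ?_, pvRuns_cons c' t⟩
  · intro a ha
    simpa using head_dropWhile_false (· == c') t a ha
  · exact Nat.lt_succ_of_le (List.length_dropWhile_le (· == c') t)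

lemma count_repl_runsOf (c : Char) (mm : Nat) :
    ∀ (s : List Char),
      PySem.Chars.count s (List.replicate (mm + 1) c)
        = (((pvRuns s).filter (fun q => q.1 == c)).map (fun q => q.2 / (mm + 1))).sum := by
  refine list_length_induction _ ?_
  intro s ih
  cases s with
  | nil => simp [pvRuns, count_nil_pat, List.replicate_succ]
  | cons c' t =>
      obtain ⟨k, r, hsplit, hr, hrl, hruns⟩ := run_view c' t
      rw [hruns]
      by_cases hcc : c' = c
      · subst hcc
        conv_lhs => rw [hsplit]
        rw [count_repl_run c' mm r hr (k + 1)]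
        rw [ih r hrl]
        simp
      · conv_lhs => rw [hsplit]
        rw [count_repl_other (hdc := hcc) mm (k + 1) r]
        rw [ih r hrl]
        rw [List.filter_cons_of_neg (by simpa using hcc)]

lemma pvRuns_pos : ∀ (s : List Char), ∀ q ∈ pvRuns s, 1 ≤ q.2 := by
  refine list_length_induction _ ?_
  intro s ih
  cases s with
  | nil => simp [pvRuns]
  | cons c t =>
      obtain ⟨k, r, hsplit, hr, hrl, hruns⟩ := run_view c t
      rw [hruns]
      intro q hq
      rcases List.mem_cons.mp hq with h | h
      · subst h; omega
      · exact ih r hrl q h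

lemma pvRuns_fst_mem : ∀ (s : List Char), ∀ (c : Char), (c ∈ (pvRuns s).map (·.1)) ↔ c ∈ s := by
  refine list_length_induction _ ?_
  intro s ih
  cases s with
  | nil => simp [pvRuns]
  | cons c' t =>
      intro c
      obtain ⟨k, r, hsplit, hr, hrl, hruns⟩ := run_view c' t
      rw [hruns]
      conv_rhs => rw [hsplit]
      simp only [List.map_cons, List.mem_cons, List.mem_append, List.mem_replicate]
      rw [ih r hrl c]
      constructor
      · rintro (h | h)
        · left; exact ⟨by omega, h⟩
        · right; exact h
      · rintro (⟨_, h⟩ | h)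
        · left; exact h
        · right; exact h

lemma isIn_repl_iff (c : Char) (n : Nat) (hn : 1 ≤ n) :
    ∀ (s : List Char),
      PySem.Chars.isIn (List.replicate n c) s = true ↔ ∃ q ∈ pvRuns s, q.1 = c ∧ n ≤ q.2 := by
  refine list_length_induction _ ?_
  intro s ih
  rw [← PySem.Chars.exists_prefix_drop_iff_isIn]
  cases s with
  | nil =>
      simp only [List.drop_nil, pvRuns]
      constructor
      · rintro ⟨j, hj⟩
        rw [List.prefix_nil] at hj
        have := congrArg List.length hj
        simp at this
        omega
      · rintro ⟨q, hq, _⟩; simp at hq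
  | cons c' t =>
      obtain ⟨k, r, hsplit, hr, hrl, hruns⟩ := run_view c' t
      have ihr := ih r hrl
      rw [← PySem.Chars.exists_prefix_drop_iff_isIn] at ihr
      rw [hruns]
      constructor
      · rintro ⟨j, hj⟩
        rw [hsplit] at hj
        by_cases hjk : j < k + 1
        · rw [List.drop_append, List.drop_replicate,
            show j - (List.replicate (k + 1) c').length = 0 by simp; omega, List.drop_zero] at hj
          by_cases hcc : c' = c
          · subst hcc
            have := (repl_prefix_iff c' r hr n (k + 1 - j)).mp hj
            exact ⟨(c', k + 1), List.mem_cons_self .., rfl, by omega⟩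
          · exfalso
            obtain ⟨nn, rfl⟩ : ∃ nn, n = nn + 1 := ⟨n - 1, by omega⟩
            obtain ⟨kk, hkk⟩ : ∃ kk, k + 1 - j = kk + 1 := ⟨k - j, by omega⟩
            rw [hkk, List.replicate_succ (n := nn), List.replicate_succ (n := kk),
              List.cons_append, List.cons_prefix_cons] at hj
            exact hcc hj.1.symm
        · obtain ⟨j', rfl⟩ : ∃ j', j = (k + 1) + j' := ⟨j - (k + 1), by omega⟩
          rw [List.drop_append, List.drop_replicate] at hj
          rw [show List.replicate (k + 1 - (k + 1 + j')) c' = [] by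
            rw [show k + 1 - (k + 1 + j') = 0 by omega]; rfl, List.nil_append] at hj
          rw [show k + 1 + j' - (List.replicate (k + 1) c').length = j' by simp] at hj
          obtain ⟨q, hq, hq1, hq2⟩ := ihr.mp ⟨j', hj⟩
          exact ⟨q, List.mem_cons_of_mem _ hq, hq1, hq2⟩
      · rintro ⟨q, hq, hq1, hq2⟩
        rcases List.mem_cons.mp hq with h | h
        · refine ⟨0, ?_⟩
          rw [hsplit, List.drop_zero]
          have hc' : c' = c := by rw [h] at hq1; exact hq1
          subst hc'
          apply (repl_prefix_iff c' r hr n (k + 1)).mpr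
          have : q.2 = k + 1 := by rw [h]
          omega
        · obtain ⟨j, hj⟩ := ihr.mpr ⟨q, h, hq1, hq2⟩
          refine ⟨(k + 1) + j, ?_⟩
          rw [hsplit, List.drop_append, List.drop_replicate,
            show k + 1 + j - (List.replicate (k + 1) c').length = j by simp]
          rw [show List.replicate (k + 1 - (k + 1 + j)) c' = [] by
            rw [show k + 1 - (k + 1 + j) = 0 by omega]; rfl, List.nil_append]
          exact hj

-- B's foldl equals pvRuns
lemma runsB_loop (s : List Char) :
    ∀ (p : Char) (k : Nat) (runs : List (Char × Nat)),
      flushRunsB (s.foldl stepRunsB (runs, some p, k))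
        = runs ++ (p, k + (s.takeWhile (· == p)).length) :: pvRuns (s.dropWhile (· == p)) := by
  induction s with
  | nil => intro p k runs; simp [flushRunsB, pvRuns]
  | cons a t ih =>
      intro p k runs
      by_cases hap : a = p
      · subst hap
        rw [List.foldl_cons]
        have hstep : stepRunsB (runs, some a, k) a = (runs, some a, k + 1) := by
          simp [stepRunsB]
        rw [hstep, ih]
        simp
        omega
      · rw [List.foldl_cons]
        have hstep : stepRunsB (runs, some p, k) a = (runs ++ [(p, k)], some a, 1) := by
          simp [stepRunsB, hap]
        rw [hstep, ih]
        have h1 : ((a :: t).takeWhile (· == p)) = [] := by simp [hap]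
        have h2 : ((a :: t).dropWhile (· == p)) = a :: t := by simp [hap]
        rw [h1, h2, pvRuns_cons]
        simp
        omega

lemma runsB_eq_pvRuns (s : List Char) : runsB s = pvRuns s := by
  cases s with
  | nil => simp [runsB, flushRunsB, pvRuns]
  | cons c t =>
      rw [runsB, List.foldl_cons]
      have hstep : stepRunsB ([], none, 0) c = ([], some c, 1) := by simp [stepRunsB]
      rw [hstep, runsB_loop, pvRuns_cons]
      simp
      omega

lemma foldl_filter_of_skip {α β : Type} (p : α → Bool) (f : β → α → β)
    (h : ∀ (acc : β) (a : α), p a = false → f acc a = acc) :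
    ∀ (l : List α) (acc : β), l.foldl f acc = (l.filter p).foldl f acc := by
  intro l
  induction l with
  | nil => intro acc; rfl
  | cons a t ih =>
      intro acc
      by_cases ha : p a = true
      · rw [List.foldl_cons, List.filter_cons_of_pos ha, List.foldl_cons, ih]
      · rw [List.foldl_cons, List.filter_cons_of_neg (by simpa using ha),
          h acc a (by simpa using ha), ih]

lemma find?_congr' {α : Type} (l : List α) (p q : α → Bool) (h : ∀ x ∈ l, p x = q x) :
    l.find? p = l.find? q := by
  induction l with
  | nil => rfl
  | cons a t ih =>
      rw [List.find?_cons, List.find?_cons, h a (List.mem_cons_self ..)]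
      split
      · rfl
      · exact ih (fun x hx => h x (List.mem_cons_of_mem _ hx))

lemma length_le_sum_of_pos : ∀ (l : List Nat), (∀ x ∈ l, 1 ≤ x) → l.length ≤ l.sum := by
  intro l
  induction l with
  | nil => simp
  | cons a t ih =>
      intro h
      simp only [List.length_cons, List.sum_cons]
      have h1 := ih (fun x hx => h x (List.mem_cons_of_mem _ hx))
      have h2 := h a (List.mem_cons_self ..)
      omega

lemma sum_le_mem_len_one (L : List Nat) (hpos : ∀ x ∈ L, 1 ≤ x) (a : Nat)
    (ha : a ∈ L) (hge : L.sum ≤ a) : L.length = 1 := by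
  have hperm := List.perm_cons_erase ha
  have hsum : L.sum = a + (L.erase a).sum := by
    rw [hperm.sum_eq]; simp
  have hlen : L.length = (L.erase a).length + 1 := by
    rw [hperm.length_eq]; simp
  have herl := length_le_sum_of_pos (L.erase a) (fun x hx => hpos x (List.mem_of_mem_erase hx))
  omega

-- the single-run guard: for chars of total count ≥ 2, A's "alp*n in s" test equals B's "single run" test
lemma guard_iff (c : Char) (s : List Char) (L : List Nat)
    (hL : L = ((pvRuns s).filter (fun q => q.1 == c)).map (·.2)) (hn2 : 2 ≤ L.sum) :
    PySem.Chars.isIn (List.replicate L.sum c) s = (L.length == 1) := by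
  have hpos : ∀ x ∈ L, 1 ≤ x := by
    intro x hx
    rw [hL] at hx
    obtain ⟨q, hq, rfl⟩ := List.mem_map.mp hx
    exact pvRuns_pos s q (List.mem_of_mem_filter hq)
  rw [Bool.eq_iff_iff, beq_iff_eq, isIn_repl_iff c L.sum (by omega) s]
  constructor
  · rintro ⟨q, hq, hq1, hq2⟩
    have hmem : q.2 ∈ L := by
      rw [hL]
      exact List.mem_map.mpr ⟨q, List.mem_filter.mpr ⟨hq, by simp [hq1]⟩, rfl⟩
    exact sum_le_mem_len_one L hpos q.2 hmem hq2
  · intro hlen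
    obtain ⟨a, ha1⟩ := List.length_eq_one_iff.mp hlen
    have hmem : a ∈ L := by rw [ha1]; simp
    have hsum : L.sum = a := by rw [ha1]; simp
    rw [hL] at hmem
    obtain ⟨q, hq, hq2⟩ := List.mem_map.mp hmem
    have hf := List.mem_filter.mp hq
    exact ⟨q, hf.1, by simpa using hf.2, by omega⟩

-- A's candidate list is B's candidate list filtered by "count ≥ 2"
lemma cands_eq (s : List Char) :
    PySem.List.sorted
        (PySem.Set.ofList (s.filter (fun alp => decide (2 ≤ PySem.Chars.count s [alp])))) (fun x => x) false
      = (PySem.List.sorted (PySem.Set.ofList ((pvRuns s).map (·.1))) (fun x => x) false).filter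
          (fun alp => decide (2 ≤ PySem.Chars.count s [alp])) := by
  set p : Char → Bool := fun alp => decide (2 ≤ PySem.Chars.count s [alp]) with hp
  set B := PySem.List.sorted (PySem.Set.ofList ((pvRuns s).map (·.1))) (fun x => x) false with hB
  have hBpair : B.Pairwise (· < ·) := PySem.List.sorted_ofList_pairwise_lt _
  have hpair : (B.filter p).Pairwise (fun a b => (fun x => x) a < (fun x => x) b) := hBpair.filter p
  apply PySem.List.sorted_eq_of_perm_of_pairwise_lt _ _ _ ?_ hpair
  rw [List.perm_ext_iff_of_nodup (hpair.imp (fun h => ne_of_lt h)) (PySem.Set.nodup_ofList _)]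
  intro a
  rw [List.mem_filter, PySem.Set.mem_ofList, List.mem_filter]
  rw [hB, PySem.List.mem_sorted, PySem.Set.mem_ofList, pvRuns_fst_mem]

-- total count of a single character equals the sum of its run lengths
lemma count_single_eq_sum (c : Char) (s : List Char) :
    PySem.Chars.count s [c] = (((pvRuns s).filter (fun q => q.1 == c)).map (·.2)).sum := by
  have h := count_repl_runsOf c 0 s
  simp only [Nat.zero_add, List.replicate_one, Nat.div_one] at h
  exact h

-- A's and B's loop bodies, as named functions (used only by the proofs; the ports inline them)
def stepA (s : List Char) (answer : List Char) (alp : Char) : List Char :=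
  if PySem.Chars.isIn (List.replicate (PySem.Chars.count s [alp]) alp) s then answer
  else
    match (PySem.List.pyRange 2 ((PySem.Chars.count s [alp] : Int) + 1) 1).find? (fun i =>
        PySem.Int.mod (PySem.Chars.count s [alp] : Int) i == 0 &&
        ((PySem.Chars.count s
            (List.replicate (PySem.Int.floordiv (PySem.Chars.count s [alp] : Int) i).toNat alp) : Int) == i)) with
    | some _ => answer ++ [alp]
    | none => answer

def stepB (s : List Char) (answer : List Char) (c : Char) : List Char :=
  if (((pvRuns s).filter (fun p => p.1 == c)).map (·.2)).sum < 2
      || (((pvRuns s).filter (fun p => p.1 == c)).map (·.2)).length == 1 then answer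
  else
    match (PySem.List.pyRange 2 ((((((pvRuns s).filter (fun p => p.1 == c)).map (·.2)).sum : Nat) : Int) + 1) 1).find?
        (fun k =>
        PySem.Int.mod (((((pvRuns s).filter (fun p => p.1 == c)).map (·.2)).sum : Nat) : Int) k == 0 &&
        (((((pvRuns s).filter (fun p => p.1 == c)).map (·.2)).map (fun l : Nat =>
            PySem.Int.floordiv (l : Int)
              (PySem.Int.floordiv (((((pvRuns s).filter (fun p => p.1 == c)).map (·.2)).sum : Nat) : Int) k))).sum == k)) with
    | some _ => answer ++ [c]
    | none => answer

lemma step_skip (s : List Char) (acc : List Char) (a : Char)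
    (hlt : PySem.Chars.count s [a] < 2) : stepB s acc a = acc := by
  have h2 : (((pvRuns s).filter (fun q => q.1 == a)).map (·.2)).sum < 2 := by
    rw [← count_single_eq_sum]; exact hlt
  simp [stepB, h2]

-- the divisor-loop predicates of A and B agree on the range 2 .. n
lemma pred_eq (s : List Char) (x : Char) (L : List Nat)
    (hL : L = ((pvRuns s).filter (fun q => q.1 == x)).map (·.2)) :
    ∀ i ∈ PySem.List.pyRange 2 ((L.sum : Int) + 1) 1,
      (PySem.Int.mod (L.sum : Int) i == 0 &&
        ((PySem.Chars.count s (List.replicate (PySem.Int.floordiv (L.sum : Int) i).toNat x) : Int) == i))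
      = (PySem.Int.mod (L.sum : Int) i == 0 &&
        ((L.map (fun l : Nat => PySem.Int.floordiv (l : Int) (PySem.Int.floordiv (L.sum : Int) i))).sum == i)) := by
  intro i hi
  rw [PySem.List.mem_pyRange_one] at hi
  obtain ⟨iN, rfl⟩ : ∃ iN : Nat, i = (iN : Int) := ⟨i.toNat, (Int.toNat_of_nonneg (by omega)).symm⟩
  have h2i : 2 ≤ iN := by exact_mod_cast hi.1
  have hile : iN ≤ L.sum := by
    have := hi.2
    omega
  obtain ⟨mm, hmm⟩ : ∃ mm, L.sum / iN = mm + 1 :=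
    ⟨L.sum / iN - 1, by
      have := (Nat.one_le_div_iff (show 0 < iN by omega)).mpr hile; omega⟩
  rw [PySem.Int.floordiv_natCast, hmm]
  congr 1
  rw [show ((((mm + 1 : Nat)) : Int)).toNat = mm + 1 by simp]
  rw [count_repl_runsOf x mm s]
  have hmapeq : L.map (fun l : Nat => PySem.Int.floordiv (l : Int) (((mm + 1 : Nat)) : Int))
      = L.map (fun l : Nat => ((l / (mm + 1) : Nat) : Int)) := by
    simp only [PySem.Int.floordiv_natCast]
  rw [hmapeq]
  rw [show (L.map (fun l : Nat => ((l / (mm + 1) : Nat) : Int))).sum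
      = (((L.map (fun l : Nat => l / (mm + 1))).sum : Nat) : Int) by
    rw [Nat.cast_list_sum, List.map_map]; rfl]
  rw [hL, List.map_map]
  rfl

lemma step_eq (s : List Char) (acc : List Char) (x : Char)
    (hn2 : 2 ≤ PySem.Chars.count s [x]) : stepA s acc x = stepB s acc x := by
  unfold stepA stepB
  have hsum : PySem.Chars.count s [x] = (((pvRuns s).filter (fun q => q.1 == x)).map (·.2)).sum :=
    count_single_eq_sum x s
  rw [hsum] at hn2 ⊢
  rw [guard_iff x s _ rfl hn2]
  have hlt : decide ((((pvRuns s).filter (fun q => q.1 == x)).map (·.2)).sum < 2) = false := by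
    simp; omega
  rw [hlt, Bool.false_or]
  rcases h1 : ((((pvRuns s).filter (fun q => q.1 == x)).map (·.2)).length == 1) with _ | _
  · simp only [Bool.false_eq_true, if_false]
    rw [find?_congr' _ _ _ (pred_eq s x _ rfl)]
  · simp only [if_true]

lemma answers_eq (s : List Char) :
    (PySem.List.sorted
        (PySem.Set.ofList (s.filter (fun alp => decide (2 ≤ PySem.Chars.count s [alp])))) (fun x => x) false).foldl
      (stepA s) []
  = (PySem.List.sorted (PySem.Set.ofList ((pvRuns s).map (·.1))) (fun x => x) false).foldl (stepB s) [] := by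
  have hcong : ∀ (acc : List Char), ∀ x ∈ (PySem.List.sorted
      (PySem.Set.ofList (s.filter (fun alp => decide (2 ≤ PySem.Chars.count s [alp])))) (fun x => x) false),
      stepA s acc x = stepB s acc x := by
    intro acc x hx
    apply step_eq
    have h1 := (PySem.List.mem_sorted _ _ _ x).mp hx
    have h2 := (PySem.Set.mem_ofList _ x).mp h1
    exact of_decide_eq_true (List.mem_filter.mp h2).2
  have hskip : ∀ (acc : List Char) (a : Char),
      (fun alp => decide (2 ≤ PySem.Chars.count s [alp])) a = false → stepB s acc a = acc := by
    intro acc a hpa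
    apply step_skip
    simpa using hpa
  rw [PySem.List.foldl_congr_mem _ (stepA s) (stepB s) [] hcong, cands_eq s,
    ← foldl_filter_of_skip (fun alp => decide (2 ≤ PySem.Chars.count s [alp])) (stepB s) hskip
      (PySem.List.sorted (PySem.Set.ofList ((pvRuns s).map (·.1))) (fun x => x) false) []]

-- ===== VERDICT (by name: the statement is the Claim_ definition above) =====
theorem solution_spec : Claim_equal_solution := by
  intro input_string _
  show solution input_string = solution_alt input_string
  unfold solution solution_alt
  rw [runsB_eq_pvRuns]
  exact congrArg (fun ans : List Char => if ans.isEmpty then "N" else String.ofList ans)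
    (answers_eq input_string.toList)
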